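-- pv_equiv track=rewrite | github.com/maandree/xpybar | src/plugins/application.py | strip_placeholders
-- ===== SOURCE A (Python) =====
-- def strip_placeholders(text):
--     '''
--     Remove placeholders form an exec string
--
--     @param   text:str  The exec string with placeholders
--     @return  :str      The exec string without placeholders
--     '''
--     buf, esc = '', False
--     for c in text:
--         if esc:
--             esc = False
--             if c == '%':
--                 buf += c
--         elif c == '%':
--             esc = True
--         else:
--             buf += c
--     return buf
-- ===== SOURCE B (Python) =====
-- def strip_placeholders(text):
--     '''
--     Remove placeholders form an exec string
--
--     @param   text:str  The exec string with placeholders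
--     @return  :str      The exec string without placeholders
--     '''
--     out = []
--     i, n = 0, len(text)
--     while i < n:
--         if text[i] == '%':
--             if i + 1 < n and text[i + 1] == '%':
--                 out.append('%')
--             i += 2
--         else:
--             out.append(text[i])
--             i += 1
--     return ''.join(out)
-- ===== Notes on version B (the rewrite author's own statement) =====
-- stated objective: alternative
-- what changed: Replaces the boolean escape-flag state machine with an index loop that consumes a percent sign together with its following character in one step, collecting output pieces in a list joined once at the end.
import Mathlib
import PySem

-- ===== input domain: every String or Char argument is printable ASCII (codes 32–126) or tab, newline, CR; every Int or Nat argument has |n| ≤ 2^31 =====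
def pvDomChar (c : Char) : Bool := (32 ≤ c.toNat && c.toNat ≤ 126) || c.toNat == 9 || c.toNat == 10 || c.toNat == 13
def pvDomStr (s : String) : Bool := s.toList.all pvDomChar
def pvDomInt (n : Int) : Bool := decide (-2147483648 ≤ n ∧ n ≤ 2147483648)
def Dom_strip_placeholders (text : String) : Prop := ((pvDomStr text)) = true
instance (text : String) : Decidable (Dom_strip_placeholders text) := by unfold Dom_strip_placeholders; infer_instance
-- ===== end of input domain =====

-- B replaces A's esc-flag state machine by a loop that consumes '%' plus its
-- following character in one step (alternative decomposition, same result).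


-- ===== PORT A =====
-- literal transliteration of A: fold over the characters carrying (buf, esc)
def strip_placeholders (text : String) : String :=
  (text.toList.foldl
    (fun (p : String × Bool) c =>
      if p.2 then
        (if c = '%' then (p.1.push c, false) else (p.1, false))
      else if c = '%' then (p.1, true)
      else (p.1.push c, false))
    ("", false)).1

-- ===== PORT B =====
-- B's index loop 'i += 2 on %' becomes recursion consuming one or two chars
def stripAlt : List Char → List Char
  | [] => []
  | [c] => if c = '%' then [] else [c]
  | c :: c2 :: rest =>
    if c = '%' then
      (if c2 = '%' then '%' :: stripAlt rest else stripAlt rest)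
    else c :: stripAlt (c2 :: rest)

def strip_placeholders_alt (text : String) : String :=
  String.ofList (stripAlt text.toList)

-- ===== PRECONDITION & SPEC =====
def Spec_strip_placeholders (text : String) (out : String) : Prop := out = strip_placeholders_alt text
instance (text : String) (out : String) : Decidable (Spec_strip_placeholders text out) := by unfold Spec_strip_placeholders; infer_instance

-- ===== CLAIM (what is proved, stated in full; the proofs are below) =====
def Claim_equal_strip_placeholders : Prop := ∀ (text : String), Dom_strip_placeholders text → Spec_strip_placeholders text (strip_placeholders text)

-- ===== LEMMAS AND PROOFS =====

theorem push_ofList (buf : String) (c : Char) (cs : List Char) :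
    buf.push c ++ String.ofList cs = buf ++ String.ofList (c :: cs) := by
  apply String.ext
  simp

theorem stripAlt_cons_ne (c : Char) (rest : List Char) (hc : ¬ c = '%') :
    stripAlt (c :: rest) = c :: stripAlt rest := by
  cases rest <;> simp [stripAlt, hc]

theorem fold_stripAlt (l : List Char) :
    ∀ buf : String,
      ((l.foldl
        (fun (p : String × Bool) c =>
          if p.2 then
            (if c = '%' then (p.1.push c, false) else (p.1, false))
          else if c = '%' then (p.1, true)
          else (p.1.push c, false))
        (buf, false)).1 = buf ++ String.ofList (stripAlt l))
      ∧
      ((l.foldl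
        (fun (p : String × Bool) c =>
          if p.2 then
            (if c = '%' then (p.1.push c, false) else (p.1, false))
          else if c = '%' then (p.1, true)
          else (p.1.push c, false))
        (buf, true)).1 = buf ++ String.ofList (stripAlt ('%' :: l))) := by
  induction l with
  | nil =>
    intro buf
    constructor <;> simp [stripAlt]
  | cons c rest ih =>
    intro buf
    constructor
    · by_cases hc : c = '%'
      · subst hc
        simpa using (ih buf).2
      · rw [stripAlt_cons_ne c rest hc, ← push_ofList]
        simpa [hc] using (ih (buf.push c)).1
    · by_cases hc : c = '%'
      · subst hc
        rw [show stripAlt ('%' :: '%' :: rest) = '%' :: stripAlt rest from by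
              simp [stripAlt],
            ← push_ofList]
        simpa using (ih (buf.push '%')).1
      · rw [show stripAlt ('%' :: c :: rest) = stripAlt rest from by
              simp [stripAlt, hc]]
        simpa [hc] using (ih buf).1

-- ===== VERDICT =====
theorem strip_placeholders_spec : Claim_equal_strip_placeholders := by
  intro text _
  unfold Spec_strip_placeholders strip_placeholders strip_placeholders_alt
  simpa using (fold_stripAlt text.toList "").1
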